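-- pv_equiv track=rewrite | github.com/pypi-data/pypi-mirror-265 | packages/jsspetri/jsspetri-1.0.2-py3-none-any.whl/jsspetri/envs/multi/petri_simulator.py | action_mapping
-- ===== SOURCE A (Python) =====
-- def action_mapping(n_machines, n_jobs):
--     """
--     Maps multidiscrete actions to a more versatile Descrite format to use with exp DQN.
--
--     Parameters:
--         n_machines (int): Number of machines.
--         n_jobs (int): Number of jobs.
--
--     Returns:
--         dict: Mapping dictionary.
--     """
--     tuples = []
--     mapping_dict = {}
--
--     for machine in range(n_machines):
--         for job in range(n_jobs):
--             tuple_entry = (job, machine)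
--             tuples.append(tuple_entry)
--             index = len(tuples) - 1
--             mapping_dict[index] = tuple_entry
--
--     return mapping_dict
-- ===== SOURCE B (Python) =====
-- def action_mapping(n_machines, n_jobs):
--     """
--     Maps multidiscrete actions to a more versatile Descrite format to use with exp DQN.
--
--     Parameters:
--         n_machines (int): Number of machines.
--         n_jobs (int): Number of jobs.
--
--     Returns:
--         dict: Mapping dictionary.
--     """
--     if n_machines <= 0 or n_jobs <= 0:
--         return {}
--     return {i: (i % n_jobs, i // n_jobs) for i in range(n_machines * n_jobs)}
-- ===== Notes on version B (the rewrite author's own statement) =====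
-- stated objective: simpler
-- what changed: Replaces the nested machine/job loops and the growing `tuples` list (whose length recomputes each key) with a single dict comprehension over the flat index i in range(n_machines*n_jobs), recovering the pair in closed form as (i % n_jobs, i // n_jobs).
import Mathlib
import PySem

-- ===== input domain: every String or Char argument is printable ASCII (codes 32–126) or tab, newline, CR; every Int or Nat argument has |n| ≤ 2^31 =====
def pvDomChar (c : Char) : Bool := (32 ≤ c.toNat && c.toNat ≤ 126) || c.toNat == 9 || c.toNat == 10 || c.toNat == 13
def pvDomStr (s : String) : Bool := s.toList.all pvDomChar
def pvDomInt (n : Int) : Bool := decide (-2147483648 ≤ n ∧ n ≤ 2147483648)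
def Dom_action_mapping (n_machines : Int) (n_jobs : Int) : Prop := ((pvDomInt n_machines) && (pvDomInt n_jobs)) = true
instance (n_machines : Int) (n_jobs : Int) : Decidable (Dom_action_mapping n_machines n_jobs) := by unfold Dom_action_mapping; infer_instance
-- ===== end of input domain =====

-- B builds the dict in one pass over the flat index i, recovering each pair in closed form as
-- (i % n_jobs, i // n_jobs), instead of A's nested loops with a growing `tuples` list (objective: simpler).

-- ===== PORT A =====
def action_mapping (n_machines : Int) (n_jobs : Int) : List (Int × Int × Int) :=
  let res := (PySem.List.pyRange 0 n_machines 1).foldl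
    (fun (st : List (Int × Int) × PySem.Dict Int (Int × Int)) machine =>
      (PySem.List.pyRange 0 n_jobs 1).foldl
        (fun (st : List (Int × Int) × PySem.Dict Int (Int × Int)) job =>
          let tupleEntry := (job, machine)
          let tuples := st.1 ++ [tupleEntry]
          let index : Int := (tuples.length : Int) - 1
          (tuples, st.2.insert index tupleEntry)) st)
    ([], PySem.Dict.empty)
  res.2.items

-- ===== PORT B =====
def action_mapping_alt (n_machines : Int) (n_jobs : Int) : List (Int × Int × Int) :=
  if n_machines ≤ 0 ∨ n_jobs ≤ 0 then []
  else
    ((PySem.List.pyRange 0 (n_machines * n_jobs) 1).foldl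
      (fun (d : PySem.Dict Int (Int × Int)) i =>
        d.insert i (PySem.Int.mod i n_jobs, PySem.Int.floordiv i n_jobs))
      PySem.Dict.empty).items

-- ===== PRECONDITION & SPEC =====
def Spec_action_mapping (n_machines : Int) (n_jobs : Int) (out : List (Int × Int × Int)) : Prop := out = action_mapping_alt n_machines n_jobs
instance (n_machines : Int) (n_jobs : Int) (out : List (Int × Int × Int)) : Decidable (Spec_action_mapping n_machines n_jobs out) := by unfold Spec_action_mapping; infer_instance

-- ===== CLAIM (what is proved, stated in full; the proofs are below) =====
def Claim_equal_action_mapping : Prop := ∀ (n_machines : Int) (n_jobs : Int), Dom_action_mapping n_machines n_jobs → Spec_action_mapping n_machines n_jobs (action_mapping n_machines n_jobs)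

-- ===== LEMMAS AND PROOFS =====

-- the common value: entry i ↦ (i, i % nj, i // nj) for i in range(a, b)
def pvF (a b nj : Int) : List (Int × Int × Int) :=
  (PySem.List.pyRange a b 1).map (fun i => (i, PySem.Int.mod i nj, PySem.Int.floordiv i nj))

lemma mod_shift (m nj : Int) (hj : 0 < nj) (k : Int) (h0 : 0 ≤ k) (hk : k < nj) :
    PySem.Int.mod (m * nj + k) nj = k := by
  rw [PySem.Int.mod_eq_emod_of_pos hj]
  have h : m * nj + k = k + nj * m := by ring
  rw [h, Int.add_mul_emod_self_left, Int.emod_eq_of_lt h0 hk]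

lemma div_shift (m nj : Int) (hj : 0 < nj) (k : Int) (h0 : 0 ≤ k) (hk : k < nj) :
    PySem.Int.floordiv (m * nj + k) nj = m := by
  rw [PySem.Int.floordiv_eq_iff_of_pos hj]
  constructor <;> nlinarith

lemma pyRange_shift (s nj : Int) :
    PySem.List.pyRange s (s + nj) 1 = (PySem.List.pyRange 0 nj 1).map (fun j => s + j) := by
  rw [PySem.List.pyRange_one, PySem.List.pyRange_one]
  simp [List.map_map, Function.comp]

-- a block of nj consecutive indices starting at m*nj decodes to machine m
lemma pvF_segment (m nj : Int) (hj : 0 < nj) :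
    pvF (m * nj) (m * nj + nj) nj
      = (PySem.List.pyRange 0 nj 1).map (fun j => (m * nj + j, j, m)) := by
  unfold pvF
  rw [pyRange_shift, List.map_map]
  apply List.map_congr_left
  intro j hj'
  have h := (PySem.List.mem_pyRange_one).mp hj'
  simp [Function.comp, mod_shift m nj hj j h.1 h.2, div_shift m nj hj j h.1 h.2]

lemma tuples_segment (m nj : Int) (hj : 0 < nj) :
    (PySem.List.pyRange (m * nj) (m * nj + nj) 1).map
        (fun i => (PySem.Int.mod i nj, PySem.Int.floordiv i nj))
      = (PySem.List.pyRange 0 nj 1).map (fun j => (j, m)) := by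
  rw [pyRange_shift, List.map_map]
  apply List.map_congr_left
  intro j hj'
  have h := (PySem.List.mem_pyRange_one).mp hj'
  simp [Function.comp, mod_shift m nj hj j h.1 h.2, div_shift m nj hj j h.1 h.2]

lemma enum_map_range {α : Type} (f : Nat → α) (s : Int) (n : Nat) :
    PySem.List.enumerate ((List.range n).map f) s
      = (List.range n).map (fun (k : Nat) => ((s + k : Int), f k)) := by
  induction n with
  | zero => simp [PySem.List.enumerate_nil]
  | succ n ih =>
      simp [List.range_succ, PySem.List.enumerate_append, ih,
            PySem.List.enumerate_cons, PySem.List.enumerate_nil]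

lemma enumerate_pyRange (nj : Int) (s : Int) :
    PySem.List.enumerate (PySem.List.pyRange 0 nj 1) s
      = (PySem.List.pyRange 0 nj 1).map (fun j => (s + j, j)) := by
  rw [PySem.List.pyRange_one]
  rw [enum_map_range (fun k => (0 : Int) + (k : Int)) s (nj - 0).toNat]
  simp [List.map_map, Function.comp]

-- A's inner loop, restructured: it appends the new pairs to `tuples` and inserts them
-- at the consecutive keys enumerate provides, starting from the current length
lemma inner_fold (machine : Int) (js : List Int) :
    ∀ (tuples : List (Int × Int)) (d : PySem.Dict Int (Int × Int)),
      js.foldl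
        (fun (st : List (Int × Int) × PySem.Dict Int (Int × Int)) job =>
          let tupleEntry := (job, machine)
          let tuples := st.1 ++ [tupleEntry]
          let index : Int := (tuples.length : Int) - 1
          (tuples, st.2.insert index tupleEntry)) (tuples, d)
      = (tuples ++ js.map (fun j => (j, machine)),
         (PySem.List.enumerate js (tuples.length : Int)).foldl
           (fun d p => d.insert p.1 (p.2, machine)) d) := by
  induction js with
  | nil => intro tuples d; simp [PySem.List.enumerate_nil]
  | cons j js ih =>
      intro tuples d
      simp only [List.foldl_cons, PySem.List.enumerate_cons]
      rw [ih]
      simp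

-- invariant of A's outer loop: after m machines the dict holds pvF 0 (m*nj) nj
lemma outer_fold (nj : Int) (hj : 0 < nj) (m : Nat) :
    (PySem.List.pyRange 0 (m : Int) 1).foldl
      (fun (st : List (Int × Int) × PySem.Dict Int (Int × Int)) machine =>
        (PySem.List.pyRange 0 nj 1).foldl
          (fun (st : List (Int × Int) × PySem.Dict Int (Int × Int)) job =>
            let tupleEntry := (job, machine)
            let tuples := st.1 ++ [tupleEntry]
            let index : Int := (tuples.length : Int) - 1
            (tuples, st.2.insert index tupleEntry)) st)
      ([], PySem.Dict.empty)
    = ((PySem.List.pyRange 0 ((m : Int) * nj) 1).map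
         (fun i => (PySem.Int.mod i nj, PySem.Int.floordiv i nj)),
       PySem.Dict.mk (pvF 0 ((m : Int) * nj) nj)) := by
  induction m with
  | zero =>
      simp [PySem.List.pyRange_one_eq_nil (le_refl (0 : Int)), pvF]
      rfl
  | succ m ih =>
      have hcast : ((m + 1 : Nat) : Int) = (m : Int) + 1 := by push_cast; ring
      rw [hcast, PySem.List.pyRange_one_succ_right (by positivity), List.foldl_append, ih]
      simp only [List.foldl_cons, List.foldl_nil]
      rw [inner_fold]
      have hlen : ((((PySem.List.pyRange 0 ((m : Int) * nj) 1).map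
          (fun i => (PySem.Int.mod i nj, PySem.Int.floordiv i nj))).length : Int))
          = (m : Int) * nj := by
        have h0 : (0 : Int) ≤ (m : Int) * nj := by positivity
        simp [PySem.List.length_pyRange_one, Int.toNat_of_nonneg h0]
      rw [hlen, enumerate_pyRange]
      have hsplit : PySem.List.pyRange 0 (((m : Int) + 1) * nj) 1
          = PySem.List.pyRange 0 ((m : Int) * nj) 1
            ++ PySem.List.pyRange ((m : Int) * nj) ((m : Int) * nj + nj) 1 := by
        have h1 : ((m : Int) + 1) * nj = (m : Int) * nj + nj := by ring
        rw [h1]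
        exact PySem.List.pyRange_one_append 0 ((m : Int) * nj) ((m : Int) * nj + nj)
          (by positivity) (by linarith)
      refine Prod.ext ?_ ?_
      · show _ ++ _ = _
        rw [hsplit, List.map_append, tuples_segment m nj hj]
      · show _ = PySem.Dict.mk _
        apply PySem.Dict.ext
        rw [PySem.Dict.items_foldl_insert_fresh]
        · show pvF 0 ((m : Int) * nj) nj ++ _ = pvF 0 (((m : Int) + 1) * nj) nj
          rw [List.map_map]
          have hcomp : ((fun (p : Int × Int) => (p.1, p.2, (m : Int))) ∘
              fun j => ((m : Int) * nj + j, j))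
              = fun j => ((m : Int) * nj + j, j, (m : Int)) := rfl
          rw [hcomp, ← pvF_segment m nj hj]
          unfold pvF
          rw [hsplit, List.map_append]
        · -- fresh keys: every inserted key is ≥ m*nj, existing keys are < m*nj
          intro p hp
          simp only [List.mem_map] at hp
          obtain ⟨j, hjmem, rfl⟩ := hp
          have hjb := (PySem.List.mem_pyRange_one).mp hjmem
          rw [← Bool.not_eq_true]
          intro hc
          rw [PySem.Dict.contains_iff_mem_keys] at hc
          simp only [PySem.Dict.keys_mk, pvF, List.map_map] at hc
          simp only [List.mem_map] at hc
          obtain ⟨i, himem, hi⟩ := hc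
          have hib := (PySem.List.mem_pyRange_one).mp himem
          simp [Function.comp] at hi
          omega
        · -- the inserted keys are distinct
          simp only [List.map_map]
          have : ((fun (p : Int × Int) => p.1) ∘ fun j => ((m : Int) * nj + j, j))
              = fun j => (m : Int) * nj + j := rfl
          rw [this]
          exact (PySem.List.nodup_pyRange_one 0 nj).map
            (fun a b h => by omega)

-- a loop whose body never changes the state leaves it unchanged
lemma foldl_id {α β : Type} (l : List β) (init : α) :
    l.foldl (fun st _ => st) init = init := by
  induction l with
  | nil => rfl
  | cons x xs ih => simp [ih]

-- B's single fold inserts distinct fresh keys, so its items are exactly pvF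
lemma alt_eq_pvF (nm nj : Int) (hm : 0 < nm) (hj : 0 < nj) :
    action_mapping_alt nm nj = pvF 0 (nm * nj) nj := by
  unfold action_mapping_alt
  rw [if_neg (by omega)]
  rw [PySem.Dict.items_foldl_insert_fresh (k := fun i => i)]
  · rfl
  · intro a _; rfl
  · simpa using PySem.List.nodup_pyRange_one 0 (nm * nj)

-- ===== VERDICT (by name: the statement is the Claim_ definition above) =====
theorem action_mapping_spec : Claim_equal_action_mapping := by
  intro nm nj _
  unfold Spec_action_mapping
  by_cases h : nm ≤ 0 ∨ nj ≤ 0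
  · -- degenerate: both sides are the empty dict
    have halt : action_mapping_alt nm nj = [] := by
      unfold action_mapping_alt; rw [if_pos h]
    rw [halt]
    unfold action_mapping
    rcases h with h | h
    · rw [PySem.List.pyRange_one_eq_nil h]; rfl
    · simp only [PySem.List.pyRange_one_eq_nil h, List.foldl_nil]
      rw [foldl_id]
      rfl
  · have hm : 0 < nm := by omega
    have hj : 0 < nj := by omega
    rw [alt_eq_pvF nm nj hm hj]
    unfold action_mapping
    have hnm : ((nm.toNat : Int)) = nm := Int.toNat_of_nonneg (le_of_lt hm)
    rw [← hnm, outer_fold nj hj nm.toNat]
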